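-- pv_equiv track=rewrite | github.com/AslanZ-5/git-two | codewars/code1.py | balanced_num
-- ===== SOURCE A (Python) =====
-- def balanced_num(n):
--     n = [ int(i) for i in str(n)]
--     if len(str(n)) < 3:
--         return 'Balanced'
--     elif len(n)%2 ==0:
--         if sum(n[:len(n)//2-1]) == sum(n[len(n)//2+1:]):
--             return 'Balanced'
--         else:
--             return "Not Balanced"
--     elif len(n)%2 != 0:
--         if sum(n[:len(n)//2]) == sum(n[len(n)//2+1:]):
--             return 'Balanced'
--         else:
--             return "Not Balanced"
-- ===== SOURCE B (Python) =====
-- def balanced_num(n):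
--     digits = [int(c) for c in str(n)]
--     left = right = 0
--     while len(digits) > 2:
--         left += digits[0]
--         right += digits[-1]
--         digits = digits[1:-1]
--     return 'Balanced' if left == right else 'Not Balanced'
-- ===== Notes on version B (the rewrite author's own statement) =====
-- stated objective: simpler
-- what changed: Replaces A's even/odd parity branching with slice arithmetic (plus a dead len(str(list))<3 guard) by a single branch-free converging peel loop that strips one digit from each end while more than two remain, accumulating the two side sums.
import Mathlib
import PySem

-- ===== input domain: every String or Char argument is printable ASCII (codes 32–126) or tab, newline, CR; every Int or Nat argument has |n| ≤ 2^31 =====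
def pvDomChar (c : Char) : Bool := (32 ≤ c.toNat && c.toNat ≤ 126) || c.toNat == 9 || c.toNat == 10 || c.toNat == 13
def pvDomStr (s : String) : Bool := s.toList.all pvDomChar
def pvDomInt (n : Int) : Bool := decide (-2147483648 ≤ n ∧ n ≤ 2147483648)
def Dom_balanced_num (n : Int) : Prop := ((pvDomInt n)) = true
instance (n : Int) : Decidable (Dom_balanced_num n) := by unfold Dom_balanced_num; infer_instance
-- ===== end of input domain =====

-- B replaces A's even/odd parity branching over slice sums (plus a dead guard) by a single
-- branch-free peel loop stripping one digit from each end; same return value wherever A returns.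

-- ===== PORT A =====
-- int(i) for a one-character string i; exact under Pre_ (n ≥ 0: every char of str(n) is a digit)
def pvIntOfChar (c : Char) : Int := (PySem.Int.ofChars? [c]).getD 0

-- hand port of Python's str() of a list of ints: '[' + ', '.join(str(d)…) + ']' — exact for int lists
def pvReprIntList (ds : List Int) : List Char :=
  '[' :: (List.intercalate [',', ' '] (ds.map PySem.Int.toChars)) ++ [']']

def balanced_num (n : Int) : String :=
  let ds : List Int := (PySem.Int.toChars n).map pvIntOfChar
  if (pvReprIntList ds).length < 3 then "Balanced"
  else if PySem.Int.mod (PySem.List.len ds) 2 = 0 then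
    if (PySem.List.slice ds none (some (PySem.Int.floordiv (PySem.List.len ds) 2 - 1))).sum
        = (PySem.List.slice ds (some (PySem.Int.floordiv (PySem.List.len ds) 2 + 1)) none).sum
    then "Balanced" else "Not Balanced"
  else if PySem.Int.mod (PySem.List.len ds) 2 ≠ 0 then
    if (PySem.List.slice ds none (some (PySem.Int.floordiv (PySem.List.len ds) 2))).sum
        = (PySem.List.slice ds (some (PySem.Int.floordiv (PySem.List.len ds) 2 + 1)) none).sum
    then "Balanced" else "Not Balanced"
  else ""  -- unreachable final branch: Python would fall off the end returning None

-- ===== PORT B =====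
-- while len(digits) > 2: left += digits[0]; right += digits[-1]; digits = digits[1:-1]
def pvPeel (ds : List Int) (l r : Int) : Int × Int :=
  if ds.length > 2 then
    pvPeel (PySem.List.slice ds (some 1) (some (-1)))
      (l + PySem.List.pyGetD ds 0 0) (r + PySem.List.pyGetD ds (-1) 0)
  else (l, r)
termination_by ds.length
decreasing_by
  have := PySem.List.length_slice ds (1 : Int) (-1)
  simp at this
  omega

def balanced_num_alt (n : Int) : String :=
  let digits : List Int := (PySem.Int.toChars n).map pvIntOfChar
  let p := pvPeel digits 0 0
  if p.1 = p.2 then "Balanced" else "Not Balanced"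

-- ===== PRECONDITION & SPEC =====
-- Pre_ excludes exactly n < 0, where Python A raises ValueError (int('-') on the sign char); B raises there too.
def Pre_balanced_num (n : Int) : Prop := 0 ≤ n
instance (n : Int) : Decidable (Pre_balanced_num n) := by unfold Pre_balanced_num; infer_instance
def pvWitness_balanced_num : Int := (12321)

def Spec_balanced_num (n : Int) (out : String) : Prop := out = balanced_num_alt n
instance (n : Int) (out : String) : Decidable (Spec_balanced_num n out) := by unfold Spec_balanced_num; infer_instance

-- ===== CLAIM (what is proved, stated in full; the proofs are below) =====
def Claim_equal_balanced_num : Prop := ∀ (n : Int), Dom_balanced_num n → Pre_balanced_num n → Spec_balanced_num n (balanced_num n)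

-- ===== LEMMAS AND PROOFS =====

theorem pv_tdc_ne_nil : ∀ (b fuel n : Nat) (acc : List Char), acc ≠ [] → Nat.toDigitsCore b fuel n acc ≠ [] := by
  intro b fuel
  induction fuel with
  | zero => intro n acc h; simpa [Nat.toDigitsCore] using h
  | succ f ih =>
    intro n acc h
    simp only [Nat.toDigitsCore]
    split
    · simp
    · exact ih _ _ (by simp)

theorem pv_toChars_ne_nil (n : Int) : PySem.Int.toChars n ≠ [] := by
  unfold PySem.Int.toChars
  split
  · simp
  · simp only [Nat.toDigits, Nat.toDigitsCore]
    split
    · simp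
    · exact pv_tdc_ne_nil _ _ _ _ (by simp)

theorem pv_intercalate_len (sep x : List Char) (xs : List (List Char)) :
    x.length ≤ (List.intercalate sep (x :: xs)).length := by
  cases xs with
  | nil => simp [List.intercalate]
  | cons y t => simp [List.intercalate, List.intersperse]

-- the peel loop returns the sums of the first k and the last k digits, k = (len-1)/2
theorem pvPeel_eq (ds : List Int) (l r : Int) :
    pvPeel ds l r = (l + (ds.take ((ds.length - 1) / 2)).sum,
                     r + (ds.drop (ds.length - (ds.length - 1) / 2)).sum) := by
  generalize hL : ds.length = L
  induction L using Nat.strong_induction_on generalizing ds l r with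
  | _ L ih =>
  rw [pvPeel]
  by_cases h : L > 2
  · rw [if_pos (by omega : ds.length > 2)]
    obtain ⟨a, tl, rfl⟩ : ∃ a tl, ds = a :: tl := by
      cases ds with
      | nil => simp at hL; omega
      | cons x xs => exact ⟨x, xs, rfl⟩
    obtain ⟨mid, b, rfl⟩ : ∃ mid b, tl = mid ++ [b] := by
      rcases tl.eq_nil_or_concat with h1 | ⟨mid, b, h1⟩
      · subst h1; simp at hL; omega
      · exact ⟨mid, b, by simpa using h1⟩
    have hm : mid.length = L - 2 := by simp at hL; omega
    rw [show PySem.List.slice (a :: (mid ++ [b])) (some 1) (some (-1)) = mid from by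
      unfold PySem.List.slice; simp]
    rw [ih (L - 2) (by omega) mid _ _ hm]
    have h0 : PySem.List.pyGetD (a :: (mid ++ [b])) 0 0 = a := PySem.List.pyGetD_zero_cons _ _ _
    have h1 : PySem.List.pyGetD (a :: (mid ++ [b])) (-1) 0 = b := by
      have he : a :: (mid ++ [b]) = (a :: mid) ++ [b] := by simp
      rw [he, PySem.List.pyGetD_neg_one_append_singleton]
    rw [h0, h1]
    have hk' : (L - 1) / 2 = (L - 3) / 2 + 1 := by omega
    have hkle : (L - 3) / 2 ≤ mid.length := by omega
    have hd : L - (L - 1) / 2 = ((L - 2) - (L - 2 - 1) / 2) + 1 := by omega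
    rw [hd, hk']
    have hmle : (L - 2) - (L - 2 - 1) / 2 ≤ mid.length := by omega
    rw [show (a :: (mid ++ [b])).take ((L-3)/2 + 1) = a :: (mid ++ [b]).take ((L-3)/2) from
      List.take_succ_cons ..]
    rw [List.take_append_of_le_length hkle]
    rw [show (a :: (mid ++ [b])).drop (((L-2) - (L-2-1)/2) + 1)
          = (mid ++ [b]).drop ((L-2) - (L-2-1)/2) from List.drop_succ_cons ..]
    rw [List.drop_append_of_le_length hmle]
    have : (L - 2 - 1) = L - 3 := by omega
    simp [this]
    constructor <;> ring
  · rw [if_neg (by omega : ¬ ds.length > 2)]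
    have hk0 : (L - 1) / 2 = 0 := by omega
    subst hL
    simp [hk0, List.drop_length]

-- ===== VERDICT (by name: the statement is the Claim_ definition above) =====
theorem balanced_num_spec : Claim_equal_balanced_num := by
  intro n _ _
  unfold Spec_balanced_num balanced_num balanced_num_alt
  set ds : List Int := (PySem.Int.toChars n).map pvIntOfChar with hds
  have hne : ds ≠ [] := by
    rw [hds]; simpa using pv_toChars_ne_nil n
  obtain ⟨d, rest, hcons⟩ := List.exists_cons_of_ne_nil hne
  have hg : ¬ ((pvReprIntList ds).length < 3) := by
    rw [hcons]
    unfold pvReprIntList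
    simp only [List.map_cons]
    have h1 := pv_intercalate_len [',', ' '] (PySem.Int.toChars d) (rest.map PySem.Int.toChars)
    have h2 : 1 ≤ (PySem.Int.toChars d).length :=
      List.length_pos_of_ne_nil (pv_toChars_ne_nil d)
    simp only [List.length_append, List.length_cons, List.length_nil, not_lt]
    omega
  rw [if_neg hg]
  simp only [pvPeel_eq]
  simp only [PySem.List.len_eq, zero_add]
  have hm1 : 1 ≤ ds.length := by rw [hcons]; simp
  have hfd : PySem.Int.floordiv ((ds.length : Nat) : Int) 2 = ((ds.length / 2 : Nat) : Int) := by
    simp [pysem]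
  by_cases hpar : PySem.Int.mod ((ds.length : Nat) : Int) 2 = 0
  · have hev : ds.length % 2 = 0 := by simp [pysem] at hpar; omega
    rw [if_pos hpar]
    have e1 : PySem.Int.floordiv ((ds.length : Nat) : Int) 2 - 1 = ((ds.length / 2 - 1 : Nat) : Int) := by
      rw [hfd]; push_cast [Nat.cast_sub (by omega : 1 ≤ ds.length / 2)]; ring
    have e2 : PySem.Int.floordiv ((ds.length : Nat) : Int) 2 + 1 = ((ds.length / 2 + 1 : Nat) : Int) := by
      rw [hfd]; push_cast; ring
    have k1 : (ds.length - 1) / 2 = ds.length / 2 - 1 := by omega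
    have k2 : ds.length - (ds.length - 1) / 2 = ds.length / 2 + 1 := by omega
    have k2' : ds.length - (ds.length / 2 - 1) = ds.length / 2 + 1 := by omega
    simp only [e1, e2, PySem.List.slice_to_natCast, PySem.List.slice_from_natCast, k1, k2']
  · rw [if_neg hpar, if_pos hpar]
    have hod : ds.length % 2 = 1 := by
      rcases Nat.mod_two_eq_zero_or_one ds.length with h | h
      · exfalso; apply hpar; simp [pysem]; omega
      · exact h
    have k1 : (ds.length - 1) / 2 = ds.length / 2 := by omega
    have k2 : ds.length - (ds.length - 1) / 2 = ds.length / 2 + 1 := by omega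
    have k2' : ds.length - ds.length / 2 = ds.length / 2 + 1 := by omega
    have e3 : ((ds.length / 2 : Nat) : Int) + 1 = ((ds.length / 2 + 1 : Nat) : Int) := by push_cast; ring
    simp only [hfd, e3, PySem.List.slice_to_natCast, PySem.List.slice_from_natCast, k1, k2']
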